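-- pv_equiv track=rewrite | github.com/foxsroot/ChatSeek | search_engine/app_v3.py | tokens_are_adjacent
-- ===== SOURCE A (Python) =====
-- def tokens_are_adjacent(token_positions):
--     if not token_positions or len(token_positions) < 2:
--         return False
--     sorted_positions = sorted(token_positions.items(), key=lambda x: x[1][0])
--     positions = [pos[1] for pos in sorted_positions]
--
--     for i in range(len(positions) - 1):
--         found_adjacent = False
--         for pos1 in positions[i]:
--             for pos2 in positions[i + 1]:
--                 if 0 <= (pos2 - pos1) <= 2:
--                     found_adjacent = True
--                     break
--             if found_adjacent:
--                 break
--         if not found_adjacent: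
--             return False
--     return True
-- ===== SOURCE B (Python) =====
-- def tokens_are_adjacent(token_positions):
--     if len(token_positions) < 2:
--         return False
--     ordered = sorted(token_positions.items(), key=lambda x: x[1][0])
--     lists = [sorted(ps) for _, ps in ordered]
--     for prev, cur in zip(lists, lists[1:]):
--         i = j = 0
--         hit = False
--         while i < len(prev) and j < len(cur):
--             d = cur[j] - prev[i]
--             if d < 0:
--                 j += 1
--             elif d <= 2:
--                 hit = True
--                 break
--             else:
--                 i += 1
--         if not hit:
--             return False
--     return True
-- ===== Notes on version B (the rewrite author's own statement) =====
-- stated objective: alternative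
-- what changed: Each position list is sorted once and every consecutive pair is checked by a two-pointer merge walk over the two sorted lists instead of A's nested scan over all position pairs.
import Mathlib
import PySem

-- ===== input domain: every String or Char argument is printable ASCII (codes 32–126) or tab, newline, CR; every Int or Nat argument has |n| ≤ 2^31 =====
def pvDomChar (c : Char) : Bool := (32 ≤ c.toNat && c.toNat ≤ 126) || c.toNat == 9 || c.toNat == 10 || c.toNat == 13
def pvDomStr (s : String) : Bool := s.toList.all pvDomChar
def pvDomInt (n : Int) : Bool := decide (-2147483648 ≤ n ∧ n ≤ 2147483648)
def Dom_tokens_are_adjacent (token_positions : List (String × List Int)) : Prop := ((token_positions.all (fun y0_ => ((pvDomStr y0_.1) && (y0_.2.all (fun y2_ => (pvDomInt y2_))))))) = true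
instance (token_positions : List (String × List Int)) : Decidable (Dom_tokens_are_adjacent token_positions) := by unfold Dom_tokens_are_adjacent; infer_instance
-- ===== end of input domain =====

-- B sorts each position list once and checks consecutive pairs with a two-pointer merge walk
-- instead of A's nested scan over all position pairs (objective: alternative algorithm).

-- ===== PORT A =====
-- inner double loop with breaks: found_adjacent = ∃ pos1 ∈ xs, ∃ pos2 ∈ ys, 0 ≤ pos2-pos1 ≤ 2
def aFoundAdjacent (xs ys : List Int) : Bool :=
  xs.any (fun pos1 => ys.any (fun pos2 => decide (0 ≤ pos2 - pos1) && decide (pos2 - pos1 ≤ 2)))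

-- the 'for i in range(len(positions)-1)' loop with its early 'return False'
def aChain : List (List Int) → Bool
  | x :: y :: rest => if aFoundAdjacent x y then aChain (y :: rest) else false
  | _ => true

def tokens_are_adjacent (token_positions : List (String × List Int)) : Bool :=
  if token_positions = [] || token_positions.length < 2 then false
  else
    -- key=lambda x: x[1][0] raises IndexError on an empty position list; Pre_ excludes those,
    -- so headD 0 is exact on every admitted input
    let sorted_positions := PySem.List.sorted token_positions (fun x => x.2.headD 0) false
    let positions := sorted_positions.map (fun pos => pos.2)
    aChain positions

-- ===== PORT B =====
-- the 'while i < len(prev) and j < len(cur)' two-pointer loop (hit/break = the 'true' result)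
def bTwoPtr : List Int → List Int → Bool
  | [], _ => false
  | _ :: _, [] => false
  | x :: xs, y :: ys =>
      if y - x < 0 then bTwoPtr (x :: xs) ys
      else if y - x ≤ 2 then true
      else bTwoPtr xs (y :: ys)
  termination_by a b => a.length + b.length

-- the 'for prev, cur in zip(lists, lists[1:])' loop with its early 'return False'
def bChain : List (List Int) → Bool
  | a :: b :: rest => if bTwoPtr a b then bChain (b :: rest) else false
  | _ => true

def tokens_are_adjacent_alt (token_positions : List (String × List Int)) : Bool :=
  if token_positions.length < 2 then false
  else
    let ordered := PySem.List.sorted token_positions (fun x => x.2.headD 0) false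
    let lists := ordered.map (fun x => PySem.List.sorted x.2 (fun p => p) false)
    bChain lists

-- ===== PRECONDITION & SPEC =====
-- Pre_ excludes inputs with ≥ 2 tokens and an empty position list, on which A's sort key
-- x[1][0] raises IndexError (B raises there too).
def Pre_tokens_are_adjacent (token_positions : List (String × List Int)) : Prop :=
  2 ≤ token_positions.length → ∀ p ∈ token_positions, p.2 ≠ []
instance (token_positions : List (String × List Int)) : Decidable (Pre_tokens_are_adjacent token_positions) := by unfold Pre_tokens_are_adjacent; infer_instance

def pvWitness_tokens_are_adjacent : (List (String × List Int)) :=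
  [("hello", [0, 5]), ("world", [2]), ("there", [3, 9])]

def Spec_tokens_are_adjacent (token_positions : List (String × List Int)) (out : Bool) : Prop := out = tokens_are_adjacent_alt token_positions
instance (token_positions : List (String × List Int)) (out : Bool) : Decidable (Spec_tokens_are_adjacent token_positions out) := by unfold Spec_tokens_are_adjacent; infer_instance

-- ===== CLAIM (what is proved, stated in full; the proofs are below) =====
def Claim_equal_tokens_are_adjacent : Prop := ∀ (token_positions : List (String × List Int)), Dom_tokens_are_adjacent token_positions → Pre_tokens_are_adjacent token_positions → Spec_tokens_are_adjacent token_positions (tokens_are_adjacent token_positions)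

-- ===== LEMMAS AND PROOFS =====

-- two-pointer correctness on sorted inputs: it finds a pair at distance 0..2 iff one exists
theorem bTwoPtr_iff (xs ys : List Int) (hx : xs.Pairwise (· ≤ ·)) (hy : ys.Pairwise (· ≤ ·)) :
    bTwoPtr xs ys = true ↔ ∃ x ∈ xs, ∃ y ∈ ys, 0 ≤ y - x ∧ y - x ≤ 2 := by
  induction xs, ys using bTwoPtr.induct with
  | case1 ys => simp [bTwoPtr]
  | case2 x xs => simp [bTwoPtr]
  | case3 x xs y ys hlt ih =>
    rw [bTwoPtr, if_pos hlt, ih hx (List.Pairwise.sublist (List.sublist_cons_self y ys) hy)]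
    constructor
    · rintro ⟨p, hp, q, hq, h⟩; exact ⟨p, hp, q, List.mem_cons_of_mem _ hq, h⟩
    · rintro ⟨p, hp, q, hq, h0, h2⟩
      rcases List.mem_cons.mp hq with rfl | hq
      · -- q = y cannot pair: every p in x::xs satisfies x ≤ p, and y - x < 0
        exfalso
        rcases List.mem_cons.mp hp with rfl | hp
        · omega
        · have := (List.pairwise_cons.mp hx).1 p hp; omega
      · exact ⟨p, hp, q, hq, h0, h2⟩
  | case4 x xs y ys hge hle =>
    rw [bTwoPtr, if_neg hge, if_pos hle]
    simp only [true_iff]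
    exact ⟨x, List.mem_cons_self, y, List.mem_cons_self, by omega, hle⟩
  | case5 x xs y ys hge hgt ih =>
    rw [bTwoPtr, if_neg hge, if_neg hgt,
      ih (List.Pairwise.sublist (List.sublist_cons_self x xs) hx) hy]
    constructor
    · rintro ⟨p, hp, q, hq, h⟩; exact ⟨p, List.mem_cons_of_mem _ hp, q, hq, h⟩
    · rintro ⟨p, hp, q, hq, h0, h2⟩
      rcases List.mem_cons.mp hp with rfl | hp
      · -- p = x cannot pair: every q in y::ys satisfies y ≤ q, and y - x > 2
        exfalso
        rcases List.mem_cons.mp hq with rfl | hq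
        · omega
        · have := (List.pairwise_cons.mp hy).1 q hq; omega
      · exact ⟨p, hp, q, hq, h0, h2⟩

-- one consecutive pair: A's nested scan = B's two-pointer walk over the sorted lists
theorem pair_eq (xs ys : List Int) :
    aFoundAdjacent xs ys
      = bTwoPtr (PySem.List.sorted xs (fun p => p) false) (PySem.List.sorted ys (fun p => p) false) := by
  apply Bool.eq_iff_iff.mpr
  rw [bTwoPtr_iff _ _ (PySem.List.sorted_pairwise ..) (PySem.List.sorted_pairwise ..)]
  unfold aFoundAdjacent
  simp only [List.any_eq_true, Bool.and_eq_true, decide_eq_true_eq, PySem.List.mem_sorted]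

-- A's chain over the raw position lists = B's chain over the per-list sorted copies
theorem chain_eq : ∀ (ps : List (List Int)),
    aChain ps = bChain (ps.map (fun l => PySem.List.sorted l (fun p => p) false))
  | [] => rfl
  | [_] => rfl
  | x :: y :: rest => by
      simp only [List.map_cons, aChain, bChain, ← pair_eq]
      by_cases h : aFoundAdjacent x y = true
      · have := chain_eq (y :: rest)
        simp only [List.map_cons] at this
        simp [h, this]
      · simp [h]

-- ===== VERDICT (by name: the statement is the Claim_ definition above) =====
theorem tokens_are_adjacent_spec : Claim_equal_tokens_are_adjacent := by
  intro tp _hdom _hpre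
  unfold Spec_tokens_are_adjacent tokens_are_adjacent tokens_are_adjacent_alt
  by_cases hlen : tp.length < 2
  · simp [hlen]
  · have hne : tp ≠ [] := by intro h; subst h; simp at hlen
    simp only [hne, hlen, decide_false, Bool.false_or, if_false]
    rw [chain_eq, List.map_map]
    rfl
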